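-- pv_equiv track=rewrite | github.com/teresaz05/kvshift | make_data.py | m1
-- ===== SOURCE A (Python) =====
-- def m1(x: list[str], q: list[str]) -> set[int]:
--     y = set()
--     for i, z in enumerate(x):
--         if z.lower() in {}:
--             y.add(i)
--     for i, z in enumerate(x):
--         if z.rstrip("?.!,:'\"").lower() in {w.rstrip("?.!,:'\"").lower() for w in q}:
--             y.add(i)
--     if not y and x:
--         y.update(range(min(6, len(x))))
--     return y
-- ===== SOURCE B (Python) =====
-- def m1(x: list[str], q: list[str]) -> set[int]:
--     P = "?.!,:'\""
--     index = {}                      # inverted index: normalized word -> indices in x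
--     for i, z in enumerate(x):
--         index.setdefault(z.rstrip(P).lower(), []).append(i)
--     keep = [False] * len(x)         # mark array
--     for w in q:
--         for i in index.get(w.rstrip(P).lower(), []):
--             keep[i] = True
--     y = {i for i, k in enumerate(keep) if k}
--     if not y and x:
--         y = set(range(min(6, len(x))))
--     return y
-- ===== Notes on version B (the rewrite author's own statement) =====
-- stated objective: faster
-- what changed: B builds an inverted index from x (normalized word -> list of indices), then iterates over q marking the indexed positions in a boolean array, and finally emits the marked indices; A scans x and tests each normalized word against a query set it rebuilds from q on every iteration (plus a dead empty-dict loop).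
import Mathlib
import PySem

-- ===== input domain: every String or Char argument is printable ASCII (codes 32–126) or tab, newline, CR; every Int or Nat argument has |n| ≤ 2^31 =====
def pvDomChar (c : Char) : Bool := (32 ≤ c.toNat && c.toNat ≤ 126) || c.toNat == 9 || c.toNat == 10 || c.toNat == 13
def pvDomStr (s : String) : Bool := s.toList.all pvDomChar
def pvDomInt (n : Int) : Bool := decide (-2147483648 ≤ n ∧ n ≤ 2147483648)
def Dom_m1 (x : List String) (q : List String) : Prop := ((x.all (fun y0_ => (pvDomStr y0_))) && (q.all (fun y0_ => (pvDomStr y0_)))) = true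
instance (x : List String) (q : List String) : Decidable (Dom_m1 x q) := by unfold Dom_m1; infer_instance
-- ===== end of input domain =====

-- B replaces A's scan of x against a query set rebuilt from q on every iteration with an
-- inverted index built from x, a marking loop driven by q, and a scan of the mark array; faster.

-- ===== PORT A =====
-- s.rstrip(chars): drop trailing characters that occur in chars (hand port, exact:
-- PySem.Str has no rstrip-with-argument form).
def pyRstripChars (s : String) (chars : String) : String :=
  String.ofList ((s.toList.reverse.dropWhile (fun c => chars.toList.contains c)).reverse)

-- z.rstrip("?.!,:'\"").lower()
def norm1 (z : String) : String := PySem.Str.lower (pyRstripChars z "?.!,:'\"")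

def m1 (x : List String) (q : List String) : List Int :=
  let y : PySem.Set Int := PySem.Set.empty
  -- first loop: membership in `{}` (the empty dict) never holds
  let y := (PySem.List.enumerate x 0).foldl
    (fun y iz => if PySem.Set.contains (PySem.Set.empty : PySem.Set String) (PySem.Str.lower iz.2)
                 then PySem.Set.add y iz.1 else y) y
  -- second loop: the query set comprehension is re-evaluated inside the loop body, as in A
  let y := (PySem.List.enumerate x 0).foldl
    (fun y iz => if PySem.Set.contains (PySem.Set.ofList (q.map norm1)) (norm1 iz.2)
                 then PySem.Set.add y iz.1 else y) y
  if y = [] ∧ x ≠ [] then PySem.Set.update y (PySem.List.pyRange 0 (min 6 (x.length : Int)) 1) else y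

-- ===== PORT B =====
def m1_alt (x : List String) (q : List String) : List Int :=
  -- index.setdefault(norm(z), []).append(i) ≡ modify the entry at norm(z) (default []) by appending i
  let index : PySem.Dict String (List Int) :=
    (PySem.List.enumerate x 0).foldl
      (fun d iz => d.modify (norm1 iz.2) [] (· ++ [iz.1])) PySem.Dict.empty
  let keep : List Bool := List.replicate x.length false
  -- keep[i] = True : i comes from enumerate(x) so it is in range; pySetD is the in-range total form
  let keep := q.foldl (fun keep w =>
    (index.getD (norm1 w) []).foldl (fun keep i => PySem.List.pySetD keep i true) keep) keep
  let y := PySem.Set.ofList (((PySem.List.enumerate keep 0).filter (·.2)).map (·.1))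
  if y = [] ∧ x ≠ [] then PySem.Set.ofList (PySem.List.pyRange 0 (min 6 (x.length : Int)) 1) else y

-- ===== PRECONDITION & SPEC =====
def Spec_m1 (x : List String) (q : List String) (out : List Int) : Prop := out = m1_alt x q
instance (x : List String) (q : List String) (out : List Int) : Decidable (Spec_m1 x q out) := by unfold Spec_m1; infer_instance

-- ===== CLAIM (what is proved, stated in full; the proofs are below) =====
def Claim_equal_m1 : Prop := ∀ (x : List String) (q : List String), Dom_m1 x q → Spec_m1 x q (m1 x q)

-- ===== LEMMAS AND PROOFS =====

-- the indices of x whose word normalizes to k, in increasing order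
def pvIdx (x : List String) (k : String) : List Int :=
  ((PySem.List.enumerate x 0).filter (fun iz => norm1 iz.2 == k)).map (·.1)

-- the dead first loop of A leaves the accumulator unchanged
theorem pv_dead_loop (l : List (Int × String)) (s : PySem.Set Int) :
    l.foldl (fun y iz => if PySem.Set.contains (PySem.Set.empty : PySem.Set String) (PySem.Str.lower iz.2)
                         then PySem.Set.add y iz.1 else y) s = s := by
  induction l generalizing s with
  | nil => rfl
  | cons a l ih =>
    rw [List.foldl_cons, if_neg (by simp [PySem.Set.contains, PySem.Set.empty])]
    exact ih s

-- A's conditional-add loop equals updating with the filtered projections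
theorem pv_fold_add (p : Int × String → Bool) (l : List (Int × String)) (s : PySem.Set Int) :
    l.foldl (fun y iz => if p iz then PySem.Set.add y iz.1 else y) s
      = PySem.Set.update s ((l.filter p).map (·.1)) := by
  induction l generalizing s with
  | nil => simp [PySem.Set.update]
  | cons a l ih =>
    by_cases h : p a = true
    · simp [List.foldl_cons, h, ih, PySem.Set.update_cons]
    · simp [List.foldl_cons, h, ih]

theorem pv_update_nil (l : List Int) :
    PySem.Set.update (PySem.Set.empty : PySem.Set Int) l = PySem.Set.ofList l := rfl

-- B's inverted index groups the indices of x by normalized word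
theorem pv_index_getD (x : List String) (k : String) :
    ((PySem.List.enumerate x 0).foldl
      (fun d iz => d.modify (norm1 iz.2) [] (· ++ [iz.1])) PySem.Dict.empty).getD k []
    = pvIdx x k := by
  have h := PySem.Dict.getD_foldl_modify_append
    (l := (PySem.List.enumerate x 0).map (fun iz => (norm1 iz.2, iz.1)))
    (d := (PySem.Dict.empty : PySem.Dict String (List Int))) (c := k)
  simpa [pvIdx, List.foldl_map, List.filter_map, List.map_map, Function.comp] using h

theorem pv_idx_pos (x : List String) (k : String) : ∀ i ∈ pvIdx x k, 0 ≤ i := by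
  intro i hi
  simp only [pvIdx, List.mem_map, List.mem_filter] at hi
  obtain ⟨iz, ⟨hmem, _⟩, rfl⟩ := hi
  rw [PySem.List.mem_enumerate_iff] at hmem
  obtain ⟨kk, _, rfl⟩ := hmem
  simp

theorem pv_idx_mem (x : List String) (k : String) (j : Nat) (hj : j < x.length) :
    ((j : Int) ∈ pvIdx x k) ↔ norm1 x[j] = k := by
  simp only [pvIdx, List.mem_map, List.mem_filter, PySem.List.mem_enumerate_iff]
  constructor
  · rintro ⟨⟨i, z⟩, ⟨⟨kk, hkk, heq⟩, hc⟩, hfst⟩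
    cases heq
    simp only at hfst hc
    have : kk = j := by omega
    subst this
    exact beq_iff_eq.mp hc
  · intro h
    exact ⟨((j : Int), x[j]), ⟨⟨j, hj, by simp⟩, beq_iff_eq.mpr h⟩, rfl⟩

theorem pv_idx_contains (x : List String) (k : String) (j : Nat) (hj : j < x.length) :
    (pvIdx x k).contains ((j : Int)) = (norm1 x[j] == k) := by
  rw [Bool.eq_iff_iff]
  simp [pv_idx_mem x k j hj]

theorem pv_mark_length (idxs : List Int) (keep : List Bool) :
    (idxs.foldl (fun k i => PySem.List.pySetD k i true) keep).length = keep.length := by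
  induction idxs generalizing keep with
  | nil => rfl
  | cons i idxs ih => simp [List.foldl_cons, ih, PySem.List.length_pySetD]

-- the inner marking loop, pointwise (indices are nonnegative)
theorem pv_mark_getElem? (idxs : List Int) (keep : List Bool) (j : Nat) (hj : j < keep.length)
    (hpos : ∀ i ∈ idxs, 0 ≤ i) :
    (idxs.foldl (fun k i => PySem.List.pySetD k i true) keep)[j]?
      = some (keep[j] || idxs.contains ((j : Int))) := by
  induction idxs generalizing keep with
  | nil => simp [List.getElem?_eq_getElem hj]
  | cons i idxs ih =>
    have hi : 0 ≤ i := hpos i (List.mem_cons_self)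
    have hset : PySem.List.pySetD keep i true = keep.set i.toNat true :=
      PySem.List.pySetD_of_nonneg _ _ hi
    have hj' : j < (PySem.List.pySetD keep i true).length := by
      rw [PySem.List.length_pySetD]; exact hj
    rw [List.foldl_cons, ih _ hj' (fun i h => hpos i (List.mem_cons_of_mem _ h))]
    congr 1
    have hget : (PySem.List.pySetD keep i true)[j]'hj' = if i.toNat = j then true else keep[j] := by
      simp [hset, List.getElem_set]
    by_cases hij : i = (j : Int)
    · simp [hij]
    · have hne : i.toNat ≠ j := by omega
      simp [hget, hne, Ne.symm hij]

theorem pv_qfold_length (x : List String) (q : List String) (keep : List Bool) :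
    (q.foldl (fun keep w =>
      (pvIdx x (norm1 w)).foldl (fun k i => PySem.List.pySetD k i true) keep) keep).length
    = keep.length := by
  induction q generalizing keep with
  | nil => rfl
  | cons w q ih => rw [List.foldl_cons, ih, pv_mark_length]

-- the whole marking phase, pointwise
theorem pv_qfold_getElem? (x : List String) (q : List String) (keep : List Bool) (j : Nat)
    (hj : j < keep.length) :
    (q.foldl (fun keep w =>
      (pvIdx x (norm1 w)).foldl (fun k i => PySem.List.pySetD k i true) keep) keep)[j]?
    = some (keep[j] || q.any (fun w => (pvIdx x (norm1 w)).contains ((j : Int)))) := by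
  induction q generalizing keep with
  | nil => simp [List.getElem?_eq_getElem hj]
  | cons w q ih =>
    have hj' : j < ((pvIdx x (norm1 w)).foldl (fun k i => PySem.List.pySetD k i true) keep).length := by
      rw [pv_mark_length]; exact hj
    rw [List.foldl_cons, ih _ hj']
    have hmark := pv_mark_getElem? (pvIdx x (norm1 w)) keep j hj (pv_idx_pos x (norm1 w))
    rw [List.getElem?_eq_getElem hj'] at hmark
    rw [Option.some.injEq] at hmark
    rw [hmark]
    simp [Bool.or_assoc]

-- Python set membership in the normalized query set, as an any-scan over q
theorem pv_set_contains (q : List String) (v : String) :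
    PySem.Set.contains (PySem.Set.ofList (q.map norm1)) v = q.any (fun w => v == norm1 w) := by
  rw [Bool.eq_iff_iff]
  constructor
  · intro h
    have : v ∈ q.map norm1 := by
      rw [← PySem.Set.mem_ofList _ _]
      exact List.contains_iff_mem.mp h
    obtain ⟨w, hw, rfl⟩ := List.mem_map.mp this
    exact List.any_eq_true.mpr ⟨w, hw, beq_iff_eq.mpr rfl⟩
  · intro h
    obtain ⟨w, hw, hbeq⟩ := List.any_eq_true.mp h
    exact List.contains_iff_mem.mpr ((PySem.Set.mem_ofList _ _).mpr
      (List.mem_map.mpr ⟨w, hw, (beq_iff_eq.mp hbeq).symm⟩))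

-- the final mark array is the membership map of x
theorem pv_keep_final (x : List String) (q : List String) :
    (q.foldl (fun keep w =>
      (pvIdx x (norm1 w)).foldl (fun k i => PySem.List.pySetD k i true) keep)
      (List.replicate x.length false))
    = x.map (fun z => PySem.Set.contains (PySem.Set.ofList (q.map norm1)) (norm1 z)) := by
  apply List.ext_getElem?
  intro j
  by_cases hj : j < x.length
  · have hjr : j < (List.replicate x.length false).length := by simpa using hj
    rw [pv_qfold_getElem? x q _ j hjr]
    rw [List.getElem?_eq_getElem (by simpa using hj)]
    congr 1
    rw [List.getElem_map, List.getElem_replicate, Bool.false_or, pv_set_contains]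
    exact PySem.List.any_congr_mem (fun w _ => pv_idx_contains x (norm1 w) j hj)
  · rw [List.getElem?_eq_none, List.getElem?_eq_none]
    · simpa using hj
    · rw [pv_qfold_length]; simpa using hj

-- enumerate over a mapped list
theorem pv_enumerate_map {α β : Type} (f : α → β) (x : List α) (s : Int) :
    PySem.List.enumerate (x.map f) s = (PySem.List.enumerate x s).map (fun iz => (iz.1, f iz.2)) := by
  induction x generalizing s with
  | nil => rfl
  | cons a x ih => simp [PySem.List.enumerate_cons, ih]

-- ===== VERDICT (by name: the statement is the Claim_ definition above) =====
theorem m1_spec : Claim_equal_m1 := by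
  intro x q _
  unfold Spec_m1 m1 m1_alt
  simp only [pv_dead_loop, pv_fold_add, pv_index_getD, pv_keep_final, pv_enumerate_map]
  simp only [List.filter_map, List.map_map, Function.comp_def, pv_update_nil]
  simp
  split_ifs with h
  · rw [h.1]; rfl
  · rfl
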